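-- pv_equiv track=rewrite | github.com/sadrados-airinstitute/NIQ | model/nutrition_extraction_pipeline.py | extract_candidate_triplets
-- ===== SOURCE A (Python) =====
-- from typing import List, Tuple, Dict
--
-- def extract_candidate_triplets(tokens: List[str], labels: List[str]) -> List[Tuple[str, str, str]]:
--     nutrients, quantities, units = [], [], []
--
--     for i, (token, label) in enumerate(zip(tokens, labels)):
--         if label == "B-NUTRIENT":
--             nutrients.append((i, token))
--         elif label == "B-QUANTITY":
--             quantities.append((i, token))
--         elif label == "B-UNIT":
--             units.append((i, token))
--
--     triplets = []
--     for n_idx, n_tok in nutrients: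
--         for q_idx, q_tok in quantities:
--             for u_idx, u_tok in units:
--                 if max([n_idx, q_idx, u_idx]) - min([n_idx, q_idx, u_idx]) <= 5:
--                     triplets.append((n_tok, q_tok, u_tok))
--     return triplets
-- ===== SOURCE B (Python) =====
-- from typing import List, Tuple
--
-- def extract_candidate_triplets(tokens: List[str], labels: List[str]) -> List[Tuple[str, str, str]]:
--     pairs = list(enumerate(zip(tokens, labels)))
--     nutrients = [(i, tok) for i, (tok, lab) in pairs if lab == "B-NUTRIENT"]
--     quantities = [(i, tok) for i, (tok, lab) in pairs if lab == "B-QUANTITY"]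
--     units = [(i, tok) for i, (tok, lab) in pairs if lab == "B-UNIT"]
--
--     triplets = []
--     qs = quantities  # suffix of quantities whose indices are still >= n_idx - 5
--     us = units       # same for units
--     for n_idx, n_tok in nutrients:
--         lo, hi = n_idx - 5, n_idx + 5
--         # indices are increasing, so elements below the window never return
--         while qs and qs[0][0] < lo:
--             qs = qs[1:]
--         while us and us[0][0] < lo:
--             us = us[1:]
--         for q_idx, q_tok in qs:
--             if q_idx > hi:
--                 break
--             for u_idx, u_tok in us:
--                 if u_idx > hi:
--                     break
--                 if abs(q_idx - u_idx) <= 5: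
--                     triplets.append((n_tok, q_tok, u_tok))
--     return triplets
-- ===== Notes on version B (the rewrite author's own statement) =====
-- stated objective: alternative
-- what changed: B replaces A's full triple nested scan over all nutrient/quantity/unit pairs by a sliding window over the (already index-sorted) quantity and unit lists: below-window prefixes are skipped once per nutrient and each inner loop breaks as soon as the index leaves [n_idx-5, n_idx+5], so only candidates inside the window are ever paired; the classification pass becomes three comprehensions.
import Mathlib
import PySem

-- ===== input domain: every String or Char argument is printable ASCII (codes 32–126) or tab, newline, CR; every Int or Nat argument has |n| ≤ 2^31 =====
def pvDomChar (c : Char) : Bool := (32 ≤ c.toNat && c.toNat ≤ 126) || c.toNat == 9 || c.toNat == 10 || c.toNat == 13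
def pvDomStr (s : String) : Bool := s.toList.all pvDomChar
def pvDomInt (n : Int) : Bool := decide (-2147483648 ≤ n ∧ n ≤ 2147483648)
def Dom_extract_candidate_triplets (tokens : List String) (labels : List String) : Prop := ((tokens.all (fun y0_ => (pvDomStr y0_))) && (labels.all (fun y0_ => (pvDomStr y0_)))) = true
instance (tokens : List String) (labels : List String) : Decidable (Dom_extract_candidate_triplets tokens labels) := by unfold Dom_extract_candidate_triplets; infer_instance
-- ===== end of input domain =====

-- B replaces A's full triple nested scan by a sliding window over the (index-sorted)
-- quantity/unit lists: skip below-window prefixes once per nutrient, break past the window.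

-- ===== PORT A =====
-- the classification loop over enumerate(zip(tokens, labels))
def pvClassStep (st : List (Int × String) × List (Int × String) × List (Int × String))
    (p : Int × String × String) :
    List (Int × String) × List (Int × String) × List (Int × String) :=
  if p.2.2 == "B-NUTRIENT" then (st.1 ++ [(p.1, p.2.1)], st.2.1, st.2.2)
  else if p.2.2 == "B-QUANTITY" then (st.1, st.2.1 ++ [(p.1, p.2.1)], st.2.2)
  else if p.2.2 == "B-UNIT" then (st.1, st.2.1, st.2.2 ++ [(p.1, p.2.1)])
  else st

def pvClassify (tokens labels : List String) :
    List (Int × String) × List (Int × String) × List (Int × String) :=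
  (PySem.List.enumerate (tokens.zip labels)).foldl pvClassStep ([], [], [])

-- triple nested loop; max([a,b,c]) / min([a,b,c]) of the 3-element literal list ported as max/min
def extract_candidate_triplets (tokens : List String) (labels : List String) :
    List (String × String × String) :=
  let c := pvClassify tokens labels
  c.1.foldl (fun acc n =>
    c.2.1.foldl (fun acc q =>
      c.2.2.foldl (fun acc u =>
        if max n.1 (max q.1 u.1) - min n.1 (min q.1 u.1) ≤ 5 then acc ++ [(n.2, q.2, u.2)]
        else acc) acc) acc) []

-- ===== PORT B =====
-- while qs and qs[0][0] < lo: qs = qs[1:]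
def pvSkip (lo : Int) : List (Int × String) → List (Int × String)
  | [] => []
  | x :: xs => if x.1 < lo then pvSkip lo xs else x :: xs

-- for u_idx, u_tok in us: if u_idx > hi: break; if abs(q_idx - u_idx) <= 5: append
def pvLoopU (hi : Int) (nTok qTok : String) (qIdx : Int)
    (acc : List (String × String × String)) :
    List (Int × String) → List (String × String × String)
  | [] => acc
  | u :: rest =>
      if u.1 > hi then acc
      else pvLoopU hi nTok qTok qIdx
        (if |qIdx - u.1| ≤ 5 then acc ++ [(nTok, qTok, u.2)] else acc) rest

-- for q_idx, q_tok in qs: if q_idx > hi: break; inner loop over us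
def pvLoopQ (hi : Int) (nTok : String) (us : List (Int × String))
    (acc : List (String × String × String)) :
    List (Int × String) → List (String × String × String)
  | [] => acc
  | q :: rest =>
      if q.1 > hi then acc
      else pvLoopQ hi nTok us (pvLoopU hi nTok q.2 q.1 acc us) rest

-- for n_idx, n_tok in nutrients: advance the window suffixes, then the bounded double loop
def pvLoopN : List (Int × String) → List (Int × String) → List (Int × String) →
    List (String × String × String) → List (String × String × String)
  | [], _, _, acc => acc
  | n :: ns, qs, us, acc =>
      let qs' := pvSkip (n.1 - 5) qs
      let us' := pvSkip (n.1 - 5) us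
      pvLoopN ns qs' us' (pvLoopQ (n.1 + 5) n.2 us' acc qs')

-- comprehension [(i, tok) for i, (tok, lab) in pairs if lab == label]
def pvSelect (lab : String) (pairs : List (Int × String × String)) : List (Int × String) :=
  (pairs.filter (fun p => p.2.2 == lab)).map (fun p => (p.1, p.2.1))

def extract_candidate_triplets_alt (tokens : List String) (labels : List String) :
    List (String × String × String) :=
  let pairs := PySem.List.enumerate (tokens.zip labels)
  pvLoopN (pvSelect "B-NUTRIENT" pairs) (pvSelect "B-QUANTITY" pairs) (pvSelect "B-UNIT" pairs) []

-- ===== PRECONDITION & SPEC =====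
def Spec_extract_candidate_triplets (tokens : List String) (labels : List String) (out : List (String × String × String)) : Prop := out = extract_candidate_triplets_alt tokens labels
instance (tokens : List String) (labels : List String) (out : List (String × String × String)) : Decidable (Spec_extract_candidate_triplets tokens labels out) := by unfold Spec_extract_candidate_triplets; infer_instance

-- ===== CLAIM (what is proved, stated in full; the proofs are below) =====
def Claim_equal_extract_candidate_triplets : Prop := ∀ (tokens : List String) (labels : List String), Dom_extract_candidate_triplets tokens labels → Spec_extract_candidate_triplets tokens labels (extract_candidate_triplets tokens labels)

-- ===== LEMMAS AND PROOFS =====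

-- the canonical per-nutrient contribution both programs compute
def pvWin (n x : Int) : Bool := decide (n - 5 ≤ x ∧ x ≤ n + 5)

def pvPerN (n : Int × String) (qs us : List (Int × String)) : List (String × String × String) :=
  (qs.filter (fun q => pvWin n.1 q.1)).flatMap (fun q =>
    (us.filter (fun u => pvWin n.1 u.1 && decide (|q.1 - u.1| ≤ 5))).map
      (fun u => (n.2, q.2, u.2)))

lemma pvSelect_cons (lab : String) (p : Int × String × String) (l : List (Int × String × String)) :
    pvSelect lab (p :: l) = (if p.2.2 == lab then [(p.1, p.2.1)] else []) ++ pvSelect lab l := by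
  simp only [pvSelect, List.filter_cons]
  split <;> simp

lemma pvClassify_foldl (l : List (Int × String × String))
    (a b c : List (Int × String)) :
    l.foldl pvClassStep (a, b, c) =
      (a ++ pvSelect "B-NUTRIENT" l, b ++ pvSelect "B-QUANTITY" l, c ++ pvSelect "B-UNIT" l) := by
  induction l generalizing a b c with
  | nil => simp [pvSelect]
  | cons p l ih =>
      simp only [List.foldl_cons, pvClassStep]
      by_cases h1 : p.2.2 = "B-NUTRIENT" <;> by_cases h2 : p.2.2 = "B-QUANTITY" <;>
        by_cases h3 : p.2.2 = "B-UNIT" <;>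
        simp_all [pvSelect_cons]

lemma pvEnum_fst_le (xs : List (String × String)) :
    ∀ (s : Int) (p : Int × String × String), p ∈ PySem.List.enumerate xs s → s ≤ p.1 := by
  induction xs with
  | nil => intro s p h; simp [PySem.List.enumerate] at h
  | cons x xs ih =>
      intro s p h
      rw [PySem.List.enumerate_cons] at h
      rcases List.mem_cons.mp h with h | h
      · simp [h]
      · have := ih (s + 1) p h; omega

lemma pvEnum_pairwise (xs : List (String × String)) (s : Int) :
    (PySem.List.enumerate xs s).Pairwise (fun a b => a.1 < b.1) := by
  induction xs generalizing s with
  | nil => simp [PySem.List.enumerate]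
  | cons x xs ih =>
      rw [PySem.List.enumerate_cons]
      exact List.Pairwise.cons (fun b hb => by have := pvEnum_fst_le xs (s + 1) b hb; omega) (ih (s + 1))

lemma pvSelect_pairwise (lab : String) (xs : List (String × String)) (s : Int) :
    (pvSelect lab (PySem.List.enumerate xs s)).Pairwise (fun a b => a.1 < b.1) := by
  unfold pvSelect
  exact List.pairwise_map.mpr ((pvEnum_pairwise xs s).filter _)

-- generic list plumbing specific to the two per-nutrient loops
lemma pvFlatMap_congr_mem {α β : Type} (l : List α) (f g : α → List β)
    (h : ∀ a ∈ l, f a = g a) : l.flatMap f = l.flatMap g := by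
  induction l with
  | nil => rfl
  | cons x xs ih =>
      simp only [List.flatMap_cons, h x (by simp), ih (fun a ha => h a (by simp [ha]))]

lemma pvFlatMap_eq_filter {α β : Type} (p : α → Bool) (g : α → List β) (l : List α)
    (h : ∀ a ∈ l, p a = false → g a = []) : l.flatMap g = (l.filter p).flatMap g := by
  induction l with
  | nil => rfl
  | cons x xs ih =>
      have ih' := ih (fun a ha => h a (by simp [ha]))
      by_cases hx : p x = true
      · simp [hx, ih']
      · simp only [Bool.not_eq_true] at hx
        simp [hx, h x (by simp) hx, ih']

-- Boolean window algebra used to normalise the filters of both sides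
lemma pvWin_merge (n x : Int) : (decide (x ≤ n + 5) && decide (n - 5 ≤ x)) = pvWin n x := by
  by_cases h1 : n - 5 ≤ x <;> by_cases h2 : x ≤ n + 5 <;> simp [pvWin, h1, h2]

lemma pvInner_merge (n q x : Int) :
    ((decide (x ≤ n + 5) && decide (|q - x| ≤ 5)) && decide (n - 5 ≤ x))
      = (pvWin n x && decide (|q - x| ≤ 5)) := by
  by_cases h3 : |q - x| ≤ 5 <;> by_cases h1 : n - 5 ≤ x <;> by_cases h2 : x ≤ n + 5 <;>
    simp [pvWin, h1, h2, h3, Bool.and_comm]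

lemma pvWin_absorb {m lo : Int} (h : lo ≤ m - 5) (x : Int) :
    (pvWin m x && decide (lo ≤ x)) = pvWin m x := by
  by_cases h1 : m - 5 ≤ x <;> by_cases h2 : x ≤ m + 5 <;>
    simp [pvWin, h1, h2, decide_eq_true_eq]
  omega

lemma pvInner_absorb {m lo : Int} (h : lo ≤ m - 5) (q x : Int) :
    ((pvWin m x && decide (|q - x| ≤ 5)) && decide (lo ≤ x))
      = (pvWin m x && decide (|q - x| ≤ 5)) := by
  by_cases h3 : |q - x| ≤ 5 <;> by_cases h1 : m - 5 ≤ x <;> by_cases h2 : x ≤ m + 5 <;>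
    simp [pvWin, h1, h2, h3, decide_eq_true_eq]
  omega

lemma pvCond3_eq {n q : Int} (hq : n - 5 ≤ q ∧ q ≤ n + 5) (u : Int) :
    decide (max n (max q u) - min n (min q u) ≤ 5) = (pvWin n u && decide (|q - u| ≤ 5)) := by
  rw [show decide (|q - u| ≤ 5) = decide (-5 ≤ q - u ∧ q - u ≤ 5) from decide_eq_decide.mpr abs_le]
  by_cases h3 : -5 ≤ q - u ∧ q - u ≤ 5
  · rw [decide_eq_true h3, Bool.and_true, pvWin, decide_eq_decide]
    omega
  · rw [decide_eq_false h3, Bool.and_false]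
    exact decide_eq_false (by omega)

-- ===== A-side characterisation =====
lemma pvA_inner (n q : Int × String) (us : List (Int × String))
    (acc : List (String × String × String)) :
    us.foldl (fun acc u =>
        if max n.1 (max q.1 u.1) - min n.1 (min q.1 u.1) ≤ 5 then acc ++ [(n.2, q.2, u.2)]
        else acc) acc
      = acc ++ (us.filter (fun u =>
          decide (max n.1 (max q.1 u.1) - min n.1 (min q.1 u.1) ≤ 5))).map
            (fun u => (n.2, q.2, u.2)) := by
  have := PySem.List.foldl_append_if
    (fun u : Int × String => decide (max n.1 (max q.1 u.1) - min n.1 (min q.1 u.1) ≤ 5))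
    (fun u => (n.2, q.2, u.2)) us acc
  simpa using this

lemma pvA_perN (n : Int × String) (qs us : List (Int × String))
    (acc : List (String × String × String)) :
    qs.foldl (fun acc q =>
      us.foldl (fun acc u =>
        if max n.1 (max q.1 u.1) - min n.1 (min q.1 u.1) ≤ 5 then acc ++ [(n.2, q.2, u.2)]
        else acc) acc) acc
    = acc ++ pvPerN n qs us := by
  rw [PySem.List.foldl_congr_mem qs _
    (fun acc q => acc ++ (us.filter (fun u =>
        decide (max n.1 (max q.1 u.1) - min n.1 (min q.1 u.1) ≤ 5))).map
          (fun u => (n.2, q.2, u.2))) acc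
    (fun acc q _ => pvA_inner n q us acc)]
  rw [PySem.List.foldl_append_eq_flatMap]
  congr 1
  rw [pvFlatMap_eq_filter (fun q => pvWin n.1 q.1) _ qs]
  · apply pvFlatMap_congr_mem
    intro q hq
    have hqwin : pvWin n.1 q.1 = true := (List.mem_filter.mp hq).2
    rw [pvWin, decide_eq_true_eq] at hqwin
    exact congrArg (List.map _) (List.filter_congr (fun u _ => pvCond3_eq hqwin u.1))
  · intro q _ hqf
    rw [pvWin] at hqf
    have hq' : ¬ (n.1 - 5 ≤ q.1 ∧ q.1 ≤ n.1 + 5) := of_decide_eq_false hqf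
    have hnil : us.filter (fun u =>
        decide (max n.1 (max q.1 u.1) - min n.1 (min q.1 u.1) ≤ 5)) = [] :=
      List.filter_eq_nil_iff.mpr (fun u _ => by
        simp only [decide_eq_true_eq]
        omega)
    rw [hnil]
    rfl

-- ===== B-side characterisation =====
lemma pvSkip_sublist (lo : Int) (l : List (Int × String)) : (pvSkip lo l).Sublist l := by
  induction l with
  | nil => simp [pvSkip]
  | cons x xs ih =>
      rw [pvSkip]
      split
      · exact ih.trans (List.sublist_cons_self x xs)
      · exact List.Sublist.refl _

lemma pvSkip_eq_filter (lo : Int) (l : List (Int × String))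
    (h : l.Pairwise (fun a b => a.1 < b.1)) :
    pvSkip lo l = l.filter (fun x => decide (lo ≤ x.1)) := by
  induction l with
  | nil => rfl
  | cons x xs ih =>
      rw [List.pairwise_cons] at h
      rw [pvSkip]
      by_cases hx : x.1 < lo
      · rw [if_pos hx, List.filter_cons, if_neg (by simpa using by omega), ih h.2]
      · rw [if_neg hx, List.filter_cons, if_pos (by simpa using by omega)]
        congr 1
        exact (List.filter_eq_self.mpr (fun a ha => by
          have := h.1 a ha; simp only [decide_eq_true_eq]; omega)).symm

lemma pvLoopU_eq (hi : Int) (nTok qTok : String) (qIdx : Int)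
    (us : List (Int × String)) (hu : us.Pairwise (fun a b => a.1 < b.1)) :
    ∀ acc, pvLoopU hi nTok qTok qIdx acc us
      = acc ++ (us.filter (fun u => decide (u.1 ≤ hi) && decide (|qIdx - u.1| ≤ 5))).map
          (fun u => (nTok, qTok, u.2)) := by
  induction us with
  | nil => intro acc; simp [pvLoopU]
  | cons u rest ih =>
      intro acc
      rw [List.pairwise_cons] at hu
      rw [pvLoopU]
      by_cases hhi : u.1 > hi
      · rw [if_pos hhi]
        have hgt : ∀ a ∈ u :: rest, ¬(a.1 ≤ hi) := by
          intro a ha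
          rcases List.mem_cons.mp ha with rfl | h
          · omega
          · have := hu.1 a h; omega
        have : (u :: rest).filter (fun u => decide (u.1 ≤ hi) && decide (|qIdx - u.1| ≤ 5)) = [] := by
          apply List.filter_eq_nil_iff.mpr
          intro a ha
          simp only [Bool.and_eq_true, decide_eq_true_eq, not_and]
          exact fun hle _ => hgt a ha hle
        simp [this]
      · rw [if_neg hhi, ih hu.2]
        by_cases hnear : |qIdx - u.1| ≤ 5 <;>
          simp [hnear, (by omega : u.1 ≤ hi)]

lemma pvLoopQ_eq (hi : Int) (nTok : String) (us qs : List (Int × String))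
    (hq : qs.Pairwise (fun a b => a.1 < b.1)) (hu : us.Pairwise (fun a b => a.1 < b.1)) :
    ∀ acc, pvLoopQ hi nTok us acc qs
      = acc ++ (qs.filter (fun q => decide (q.1 ≤ hi))).flatMap (fun q =>
          (us.filter (fun u => decide (u.1 ≤ hi) && decide (|q.1 - u.1| ≤ 5))).map
            (fun u => (nTok, q.2, u.2))) := by
  induction qs with
  | nil => intro acc; simp [pvLoopQ]
  | cons q rest ih =>
      intro acc
      rw [List.pairwise_cons] at hq
      rw [pvLoopQ]
      by_cases hhi : q.1 > hi
      · rw [if_pos hhi]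
        have : (q :: rest).filter (fun q => decide (q.1 ≤ hi)) = [] := by
          apply List.filter_eq_nil_iff.mpr
          intro a ha
          rcases List.mem_cons.mp ha with rfl | h
          · simp only [decide_eq_true_eq]; omega
          · have := hq.1 a h
            simp only [decide_eq_true_eq]; omega
        simp [this]
      · rw [if_neg hhi, ih hq.2, pvLoopU_eq hi nTok q.2 q.1 us hu acc]
        simp [(by omega : q.1 ≤ hi)]

-- per-nutrient step of B over the advanced suffixes equals the canonical contribution
lemma pvB_perN (n : Int × String) (qs us : List (Int × String))
    (hq : qs.Pairwise (fun a b => a.1 < b.1)) (hu : us.Pairwise (fun a b => a.1 < b.1))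
    (acc : List (String × String × String)) :
    pvLoopQ (n.1 + 5) n.2 (pvSkip (n.1 - 5) us) acc (pvSkip (n.1 - 5) qs)
      = acc ++ pvPerN n qs us := by
  rw [pvSkip_eq_filter _ _ hq, pvSkip_eq_filter _ _ hu]
  rw [pvLoopQ_eq _ _ _ _ (hq.filter _) (hu.filter _)]
  congr 1
  unfold pvPerN
  simp only [List.filter_filter, pvInner_merge, pvWin_merge]

lemma pvPerN_skip (m : Int × String) (lo : Int) (qs us : List (Int × String))
    (hq : qs.Pairwise (fun a b => a.1 < b.1)) (hu : us.Pairwise (fun a b => a.1 < b.1))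
    (hlo : lo ≤ m.1 - 5) :
    pvPerN m (pvSkip lo qs) (pvSkip lo us) = pvPerN m qs us := by
  rw [pvSkip_eq_filter _ _ hq, pvSkip_eq_filter _ _ hu]
  unfold pvPerN
  simp only [List.filter_filter, pvWin_absorb hlo, pvInner_absorb hlo]

lemma pvLoopN_eq (ns : List (Int × String)) :
    ∀ (qs us : List (Int × String)) acc,
      ns.Pairwise (fun a b => a.1 < b.1) →
      qs.Pairwise (fun a b => a.1 < b.1) →
      us.Pairwise (fun a b => a.1 < b.1) →
      pvLoopN ns qs us acc = ns.foldl (fun acc n => acc ++ pvPerN n qs us) acc := by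
  induction ns with
  | nil => intro qs us acc _ _ _; rfl
  | cons n ns ih =>
      intro qs us acc hn hq hu
      rw [List.pairwise_cons] at hn
      rw [pvLoopN]
      have hq' := List.Pairwise.sublist (pvSkip_sublist (n.1 - 5) qs) hq
      have hu' := List.Pairwise.sublist (pvSkip_sublist (n.1 - 5) us) hu
      rw [ih _ _ _ hn.2 hq' hu']
      rw [pvB_perN n qs us hq hu acc]
      rw [List.foldl_cons]
      apply PySem.List.foldl_congr_mem
      intro acc' m hm
      rw [pvPerN_skip m (n.1 - 5) qs us hq hu (by have := hn.1 m hm; omega)]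

-- ===== main equivalence =====
lemma pv_main (tokens labels : List String) :
    extract_candidate_triplets tokens labels = extract_candidate_triplets_alt tokens labels := by
  unfold extract_candidate_triplets extract_candidate_triplets_alt pvClassify
  rw [pvClassify_foldl]
  simp only [List.nil_append]
  rw [pvLoopN_eq _ _ _ _ (pvSelect_pairwise _ _ _) (pvSelect_pairwise _ _ _) (pvSelect_pairwise _ _ _)]
  apply PySem.List.foldl_congr_mem
  intro acc n _
  exact pvA_perN n _ _ acc

-- ===== VERDICT (by name: the statement is the Claim_ definition above) =====
theorem extract_candidate_triplets_spec : Claim_equal_extract_candidate_triplets := by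
  intro tokens labels _
  exact pv_main tokens labels
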